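-- pv_equiv track=rewrite | github.com/DhruvSharma-845/tab-pbip-31 | convert_twbx_to_pbip_auto.py | choose_table_for_fields
-- ===== SOURCE A (Python) =====
-- def choose_table_for_fields(col_meta, category, value):
--     for table, cols in col_meta.items():
--         if category in cols and value in cols:
--             return table
--     for table, cols in col_meta.items():
--         if value in cols:
--             return table
--     return "Orders"
-- ===== SOURCE B (Python) =====
-- def choose_table_for_fields(col_meta, category, value):
--     fallback = None
--     for table, cols in col_meta.items():
--         if category in cols and value in cols:
--             return table
--         if fallback is None and value in cols:
--             fallback = table
--     return fallback if fallback is not None else "Orders"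
-- ===== Notes on version B (the rewrite author's own statement) =====
-- stated objective: simpler
-- what changed: Replaces A's two priority passes over col_meta with a single scan that returns immediately on a both-fields match and records the first value-only table as a fallback.
import Mathlib
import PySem

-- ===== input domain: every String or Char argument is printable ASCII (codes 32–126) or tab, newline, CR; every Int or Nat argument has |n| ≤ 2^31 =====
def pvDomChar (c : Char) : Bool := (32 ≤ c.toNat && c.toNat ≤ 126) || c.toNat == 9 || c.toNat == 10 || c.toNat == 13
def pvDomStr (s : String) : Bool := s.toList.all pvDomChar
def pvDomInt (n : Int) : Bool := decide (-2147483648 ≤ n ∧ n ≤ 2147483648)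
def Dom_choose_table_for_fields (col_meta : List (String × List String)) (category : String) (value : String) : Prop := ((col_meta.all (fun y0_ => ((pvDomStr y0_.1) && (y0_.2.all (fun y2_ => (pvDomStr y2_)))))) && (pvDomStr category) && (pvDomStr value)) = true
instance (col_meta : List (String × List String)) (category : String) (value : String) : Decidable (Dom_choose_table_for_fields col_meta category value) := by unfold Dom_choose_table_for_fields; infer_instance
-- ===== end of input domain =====

-- B merges A's two priority passes into one scan with a fallback variable (simpler decomposition, same result).


-- ===== PORT A =====
def pvA_loop1 (category value : String) : List (String × List String) → Option String
  | [] => none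
  | (table, cols) :: rest =>
    if category ∈ cols ∧ value ∈ cols then some table else pvA_loop1 category value rest

def pvA_loop2 (value : String) : List (String × List String) → Option String
  | [] => none
  | (table, cols) :: rest =>
    if value ∈ cols then some table else pvA_loop2 value rest

def choose_table_for_fields (col_meta : List (String × List String)) (category : String) (value : String) : String :=
  match pvA_loop1 category value col_meta with
  | some table => table
  | none =>
    match pvA_loop2 value col_meta with
    | some table => table
    | none => "Orders"

-- ===== PORT B =====
def pvB_loop (category value : String) : List (String × List String) → Option String → String
  | [], fallback => fallback.getD "Orders"
  | (table, cols) :: rest, fallback =>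
    if category ∈ cols ∧ value ∈ cols then table
    else pvB_loop category value rest
      (if fallback = none ∧ value ∈ cols then some table else fallback)

def choose_table_for_fields_alt (col_meta : List (String × List String)) (category : String) (value : String) : String :=
  pvB_loop category value col_meta none

-- ===== PRECONDITION & SPEC =====
def Spec_choose_table_for_fields (col_meta : List (String × List String)) (category : String) (value : String) (out : String) : Prop := out = choose_table_for_fields_alt col_meta category value
instance (col_meta : List (String × List String)) (category : String) (value : String) (out : String) : Decidable (Spec_choose_table_for_fields col_meta category value out) := by unfold Spec_choose_table_for_fields; infer_instance

-- ===== CLAIM (what is proved, stated in full; the proofs are below) =====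
def Claim_equal_choose_table_for_fields : Prop := ∀ (col_meta : List (String × List String)) (category : String) (value : String), Dom_choose_table_for_fields col_meta category value → Spec_choose_table_for_fields col_meta category value (choose_table_for_fields col_meta category value)

-- ===== LEMMAS AND PROOFS =====
lemma pvB_loop_eq (category value : String) (l : List (String × List String)) (fb : Option String) :
    pvB_loop category value l fb =
      match pvA_loop1 category value l with
      | some t => t
      | none => fb.getD (match pvA_loop2 value l with | some t => t | none => "Orders") := by
  induction l generalizing fb with
  | nil => simp [pvB_loop, pvA_loop1, pvA_loop2]
  | cons hd tl ih =>
    obtain ⟨table, cols⟩ := hd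
    by_cases hboth : category ∈ cols ∧ value ∈ cols
    · simp [pvB_loop, pvA_loop1, hboth]
    · by_cases hv : value ∈ cols
      · have hcat : category ∉ cols := fun h => hboth ⟨h, hv⟩
        cases fb with
        | none => simp [pvB_loop, pvA_loop1, pvA_loop2, hcat, hv, ih]
        | some f => simp [pvB_loop, pvA_loop1, pvA_loop2, hcat, hv, ih]
      · simp [pvB_loop, pvA_loop1, pvA_loop2, hv, ih]

-- ===== VERDICT (by name: the statement is the Claim_ definition above) =====
theorem choose_table_for_fields_spec : Claim_equal_choose_table_for_fields := by
  intro col_meta category value _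
  unfold Spec_choose_table_for_fields choose_table_for_fields choose_table_for_fields_alt
  rw [pvB_loop_eq]
  cases pvA_loop1 category value col_meta <;> simp
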